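-- pv_equiv track=rewrite | github.com/ArthurWalker/Tech-Interview-Prep | Stripe/Exercises/CustomStringCompresion.py | customStringCompress
-- ===== SOURCE A (Python) =====
-- def customStringCompress(text: str) -> str:
--     if len(text) <=2:
--         return text
--
--     # split by /
--     slash_split = text.split("/")
--     minor_list = []
--     # [['s4e', 'c1m'], ['p6s'], ['c6t'], ['c6r', 'j2n', 'd1e']]
--     for major in slash_split:
--         dot_split = major.split(".")
--         new_dot_split = []
--         for minor in dot_split:
--             new_formated = ''
--             if len(minor)<=2:
--                 new_formated+=minor
--             else:
--                 new_formated=minor[0]+str(len(minor)-2)+minor[-1]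
--             new_dot_split.append(new_formated)
--         dot_formatted = '.'.join(new_dot_split)
--         minor_list.append(dot_formatted)
--     res = '/'.join(minor_list)
--     return res
-- ===== SOURCE B (Python) =====
-- def _compress_seg(seg: str) -> str:
--     return seg if len(seg) <= 2 else seg[0] + str(len(seg) - 2) + seg[-1]
--
--
-- def customStringCompress(text: str) -> str:
--     # single left-to-right scan: flush the current segment at each delimiter
--     out = []
--     seg = ''
--     for ch in text:
--         if ch == '/' or ch == '.':
--             out.append(_compress_seg(seg))
--             out.append(ch)
--             seg = ''
--         else:
--             seg += ch
--     out.append(_compress_seg(seg))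
--     return ''.join(out)
-- ===== Notes on version B (the rewrite author's own statement) =====
-- stated objective: alternative
-- what changed: Replaces A's nested split('/')/split('.')/join pipeline (plus a redundant short-input early return) by a single left-to-right character scan that flushes and compresses the current segment at each delimiter.
import Mathlib
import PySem

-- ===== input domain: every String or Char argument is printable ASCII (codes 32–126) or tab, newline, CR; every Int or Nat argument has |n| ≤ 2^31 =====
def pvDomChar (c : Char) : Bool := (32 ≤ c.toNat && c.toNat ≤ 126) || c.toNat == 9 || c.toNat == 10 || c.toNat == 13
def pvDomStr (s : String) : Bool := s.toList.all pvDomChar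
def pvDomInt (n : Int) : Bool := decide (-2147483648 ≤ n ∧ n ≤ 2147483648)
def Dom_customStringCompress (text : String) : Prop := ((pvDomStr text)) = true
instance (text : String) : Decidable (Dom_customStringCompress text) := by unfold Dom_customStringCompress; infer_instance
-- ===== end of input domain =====

-- B replaces A's nested split('/')/split('.')/join pipeline (with its redundant short-input early return) by a single left-to-right character scan; objective: alternative (same cost, different traversal).


-- ===== PORT A =====
-- minor[0] + str(len(minor)-2) + minor[-1]; the pyGet? lookups are in range because len(minor) > 2 on this branch
def compressMinorA (minor : List Char) : List Char :=
  if minor.length ≤ 2 then minor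
  else (PySem.List.pyGet? minor 0).toList
       ++ PySem.Int.toChars ((minor.length : Int) - 2)
       ++ (PySem.List.pyGet? minor (-1)).toList

def customStringCompress (text : String) : String :=
  if PySem.Str.len text ≤ 2 then text
  else
    let slash_split := PySem.Chars.splitOn text.toList ['/']
    let minor_list := slash_split.map (fun major =>
      PySem.Chars.join ['.'] ((PySem.Chars.splitOn major ['.']).map compressMinorA))
    String.ofList (PySem.Chars.join ['/'] minor_list)

-- ===== PORT B =====
-- seg if len(seg) <= 2 else seg[0] + str(len(seg)-2) + seg[-1]; pyGet? in range because len(seg) > 2 there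
def compressSegB (seg : List Char) : List Char :=
  if seg.length ≤ 2 then seg
  else (PySem.List.pyGet? seg 0).toList
       ++ PySem.Int.toChars ((seg.length : Int) - 2)
       ++ (PySem.List.pyGet? seg (-1)).toList

-- the scan loop: flush the accumulated segment at each delimiter, and once more at the end
def scanB (seg : List Char) : List Char → List Char
  | [] => compressSegB seg
  | c :: rest =>
      if c = '/' ∨ c = '.' then compressSegB seg ++ c :: scanB [] rest
      else scanB (seg ++ [c]) rest

def customStringCompress_alt (text : String) : String :=
  String.ofList (scanB [] text.toList)

-- ===== PRECONDITION & SPEC =====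
def Spec_customStringCompress (text : String) (out : String) : Prop := out = customStringCompress_alt text
instance (text : String) (out : String) : Decidable (Spec_customStringCompress text out) := by unfold Spec_customStringCompress; infer_instance

-- ===== CLAIM (what is proved, stated in full; the proofs are below) =====
def Claim_equal_customStringCompress : Prop := ∀ (text : String), Dom_customStringCompress text → Spec_customStringCompress text (customStringCompress text)

-- ===== LEMMAS AND PROOFS =====

-- reference splitter: split on the single delimiter d, accumulating the current piece in pre
def sAux (d : Char) (pre : List Char) : List Char → List (List Char)
  | [] => [pre]
  | c :: rest => if c = d then pre :: sAux d [] rest else sAux d (pre ++ [c]) rest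

theorem splitOn_go_spec (d : Char) (fuel : Nat) :
    ∀ (l cur : List Char) (acc : List (List Char)), l.length < fuel →
      PySem.Chars.splitOn.go [d] fuel l cur acc = acc.reverse ++ sAux d cur.reverse l := by
  induction fuel with
  | zero => intro l cur acc h; omega
  | succ n ih =>
    intro l cur acc h
    cases l with
    | nil => simp [PySem.Chars.splitOn.go, sAux]
    | cons c rest =>
      rw [PySem.Chars.splitOn.go]
      by_cases hc : c = d
      · subst hc
        simp only [List.isPrefixOf, BEq.rfl, Bool.true_and, if_true, List.length_cons,
          List.length_nil, Nat.zero_add, List.drop_succ_cons, List.drop_zero]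
        rw [ih rest [] (cur.reverse :: acc) (by simpa using Nat.lt_of_succ_lt_succ h)]
        simp [sAux]
      · have : [d].isPrefixOf (c :: rest) = false := by
          simp [List.isPrefixOf]; exact fun hh => absurd hh.symm hc
        rw [this]
        simp only [Bool.false_eq_true, if_false]
        rw [ih rest (c :: cur) acc (by simpa using Nat.lt_of_succ_lt_succ h)]
        simp [sAux, hc]

theorem splitOn_eq_sAux (d : Char) (l : List Char) :
    PySem.Chars.splitOn l [d] = sAux d [] l := by
  unfold PySem.Chars.splitOn
  rw [splitOn_go_spec d (l.length + 1) l [] [] (by omega)]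
  simp

theorem sAux_modifyHead (d : Char) (pre l : List Char) :
    sAux d pre l = (sAux d [] l).modifyHead (pre ++ ·) := by
  induction l generalizing pre with
  | nil => simp [sAux]
  | cons c rest ih =>
    by_cases hc : c = d
    · simp [sAux, hc]
    · simp only [sAux, hc, if_false]
      rw [ih (pre ++ [c])]
      rw [show ([] : List Char) ++ [c] = [c] by simp, ih [c], List.modifyHead_modifyHead]
      congr 1
      funext x
      simp

theorem sAux_no_delim (d : Char) (pre l : List Char) (h : d ∉ l) :
    sAux d pre l = [pre ++ l] := by
  induction l generalizing pre with
  | nil => simp [sAux]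
  | cons c rest ih =>
    have hc : c ≠ d := by rintro rfl; exact h (List.mem_cons_self)
    simp only [sAux, if_neg hc]
    rw [ih _ (fun hm => h (List.mem_cons_of_mem _ hm))]
    simp

theorem sAux_append_delim (d : Char) (seg x : List Char) (h : d ∉ seg) :
    sAux d [] (seg ++ d :: x) = seg :: sAux d [] x := by
  have gen : ∀ pre, sAux d pre (seg ++ d :: x) = (pre ++ seg) :: sAux d [] x := by
    induction seg with
    | nil => intro pre; simp [sAux]
    | cons c rest ih =>
      intro pre
      have hc : c ≠ d := by rintro rfl; exact h (List.mem_cons_self)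
      simp only [List.cons_append, sAux, if_neg hc]
      rw [ih (fun hm => h (List.mem_cons_of_mem _ hm)) (pre ++ [c])]
      simp
  simpa using gen []

theorem sAux_ne_nil (d : Char) (pre l : List Char) : sAux d pre l ≠ [] := by
  induction l generalizing pre with
  | nil => simp [sAux]
  | cons c rest ih => simp only [sAux]; split <;> simp [ih]

theorem compressSegB_eq (seg : List Char) : compressSegB seg = compressMinorA seg := rfl

theorem join_cons_ne (sep a : List Char) (as : List (List Char)) (h : as ≠ []) :
    PySem.Chars.join sep (a :: as) = a ++ sep ++ PySem.Chars.join sep as := by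
  cases as with
  | nil => exact absurd rfl h
  | cons b bs => exact PySem.Chars.join_cons_cons sep a b bs

-- A's processing of one slash-segment
def dotF (l : List Char) : List Char :=
  PySem.Chars.join ['.'] ((sAux '.' [] l).map compressMinorA)

-- A's whole pipeline, with the current slash-segment prefix seg made explicit
def slashE (seg l : List Char) : List Char :=
  PySem.Chars.join ['/'] ((sAux '/' seg l).map dotF)

theorem dotF_no_dot (seg : List Char) (h : '.' ∉ seg) : dotF seg = compressMinorA seg := by
  unfold dotF
  rw [sAux_no_delim _ _ _ h]
  simp [PySem.Chars.join_singleton]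

theorem dotF_append (seg x : List Char) (h : '.' ∉ seg) :
    dotF (seg ++ '.' :: x) = compressMinorA seg ++ '.' :: dotF x := by
  unfold dotF
  rw [sAux_append_delim _ _ _ h, List.map_cons,
    join_cons_ne _ _ _ (by simp [sAux_ne_nil])]
  simp

theorem scanB_eq_slashE (l : List Char) :
    ∀ seg, '.' ∉ seg → '/' ∉ seg → scanB seg l = slashE seg l := by
  induction l with
  | nil =>
    intro seg hd hs
    simp only [scanB, slashE, sAux, List.map_cons, List.map_nil,
      PySem.Chars.join_singleton, compressSegB_eq]
    rw [dotF_no_dot seg hd]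
  | cons c rest ih =>
    intro seg hd hs
    by_cases hsl : c = '/'
    · subst hsl
      simp only [scanB, slashE, sAux, true_or, if_true, eq_self_iff_true, List.map_cons]
      rw [join_cons_ne _ _ _ (by simp [sAux_ne_nil]),
        ih [] (by simp) (by simp), dotF_no_dot seg hd, compressSegB_eq]
      simp [slashE]
    · by_cases hdot : c = '.'
      · subst hdot
        simp only [scanB, if_pos (Or.inr rfl), compressSegB_eq]
        rw [ih [] (by simp) (by simp)]
        simp only [slashE, sAux, if_neg (by decide : ¬('.' = '/')), List.nil_append,
          if_neg hsl]
        rw [sAux_modifyHead '/' (seg ++ ['.'])]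
        obtain ⟨h0, t0, ht⟩ : ∃ h0 t0, sAux '/' [] rest = h0 :: t0 := by
          cases hh : sAux '/' [] rest with
          | nil => exact absurd hh (sAux_ne_nil _ _ _)
          | cons a b => exact ⟨a, b, rfl⟩
        rw [ht]
        simp only [List.modifyHead_cons, List.map_cons]
        rw [List.append_assoc, List.singleton_append,
          dotF_append seg h0 hd]
        cases t0 with
        | nil => simp [PySem.Chars.join_singleton]
        | cons b bs =>
          rw [List.map_cons, PySem.Chars.join_cons_cons, PySem.Chars.join_cons_cons]
          simp
      · have hne : ¬(c = '/' ∨ c = '.') := by tauto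
        simp only [scanB, if_neg hne]
        rw [ih (seg ++ [c]) (by simp only [List.mem_append, List.mem_singleton]; tauto)
          (by simp only [List.mem_append, List.mem_singleton]; tauto)]
        simp only [slashE, sAux, if_neg hsl]

theorem scanB_short (l : List Char) (h : l.length ≤ 2) : scanB [] l = l := by
  match l, h with
  | [], _ => rfl
  | [a], _ =>
    simp only [scanB]
    split <;> simp [scanB, compressSegB]
  | [a, b], _ =>
    simp only [scanB]
    split
    · split <;> simp [scanB, compressSegB]
    · split <;> simp [scanB, compressSegB]

-- ===== VERDICT (by name: the statement is the Claim_ definition above) =====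
theorem customStringCompress_spec : Claim_equal_customStringCompress := by
  intro text _
  unfold Spec_customStringCompress customStringCompress customStringCompress_alt
  by_cases h : PySem.Str.len text ≤ 2
  · rw [if_pos h]
    rw [scanB_short _ (by simpa [PySem.Str.len_eq] using h)]
    simp
  · rw [if_neg h]
    rw [scanB_eq_slashE _ [] (by simp) (by simp)]
    unfold slashE
    rw [splitOn_eq_sAux]
    have hm : List.map (fun major => PySem.Chars.join ['.']
          (List.map compressMinorA (PySem.Chars.splitOn major ['.']))) (sAux '/' [] text.toList)
        = List.map dotF (sAux '/' [] text.toList) :=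
      List.map_congr_left (fun a _ => by rw [splitOn_eq_sAux]; rfl)
    simp only [hm]
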